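-- pv_equiv track=rewrite | github.com/jdanray/leetcode | mergeCharacters.py | mergeCharacters
-- ===== SOURCE A (Python) =====
-- def mergeCharacters(s, k):
-- 	idx = {}
-- 	i = 0
-- 	res = ''
-- 	for c in s:
-- 		if c in idx and i - idx[c] <= k:
-- 			i -= 1
-- 		else:
-- 			idx[c] = i
-- 			res += c
-- 		i += 1
--
-- 	return res
-- ===== SOURCE B (Python) =====
-- def mergeCharacters(s, k):
-- 	out = []
-- 	window = []          # FIFO buffer of the last (at most kk) kept characters
-- 	kk = max(k, 0)
-- 	for c in s:
-- 		if c in window: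
-- 			continue
-- 		out.append(c)
-- 		window.append(c)
-- 		while len(window) > kk:
-- 			window.pop(0)
-- 	return ''.join(out)
-- ===== Notes on version B (the rewrite author's own statement) =====
-- stated objective: alternative
-- what changed: Replaces A's unbounded dict of last-kept positions plus running counter and distance comparison by a bounded FIFO window of the last k kept characters with explicit oldest-first eviction (while len(window) > kk: pop(0)); keeping a char is a plain membership test in that buffer, no positions or arithmetic at all.
import Mathlib
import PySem

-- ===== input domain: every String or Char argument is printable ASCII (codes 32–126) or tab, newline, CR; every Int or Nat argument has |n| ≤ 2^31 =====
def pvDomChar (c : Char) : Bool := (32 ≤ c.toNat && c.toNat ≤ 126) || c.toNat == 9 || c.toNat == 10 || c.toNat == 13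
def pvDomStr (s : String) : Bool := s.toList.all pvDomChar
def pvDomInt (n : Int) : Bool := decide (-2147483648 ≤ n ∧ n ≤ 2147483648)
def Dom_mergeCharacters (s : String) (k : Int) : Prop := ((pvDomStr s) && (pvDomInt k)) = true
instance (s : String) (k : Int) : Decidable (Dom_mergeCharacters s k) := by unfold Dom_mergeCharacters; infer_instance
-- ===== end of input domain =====

-- B replaces A's dict of last-kept positions + counter by a bounded FIFO window of the
-- last k kept characters with explicit oldest-first eviction; objective: alternative.

-- ===== PORT A =====
-- one loop step of A: state is (idx, i, res)
def mergeCharactersStepA (k : Int) (st : PySem.Dict Char Int × Int × List Char) (c : Char) :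
    PySem.Dict Char Int × Int × List Char :=
  let idx := st.1
  let i := st.2.1
  let res := st.2.2
  match PySem.Dict.get? idx c with
  | some p =>
      if i - p ≤ k then (idx, (i - 1) + 1, res)
      else (PySem.Dict.insert idx c i, i + 1, res ++ [c])
  | none => (PySem.Dict.insert idx c i, i + 1, res ++ [c])

def mergeCharacters (s : String) (k : Int) : String :=
  let st := s.toList.foldl (mergeCharactersStepA k) (PySem.Dict.empty, 0, [])
  String.ofList st.2.2

-- ===== PORT B =====
-- the inner eviction loop: while len(window) > kk: window.pop(0)
def mergeCharactersEvict (kk : Int) : List Char → List Char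
  | [] => []
  | c :: w => if ((w.length : Int) + 1) > kk then mergeCharactersEvict kk w else c :: w

-- one loop step of B: state is (out, window)
def mergeCharactersStepB (kk : Int) (st : List Char × List Char) (c : Char) :
    List Char × List Char :=
  if c ∈ st.2 then st
  else (st.1 ++ [c], mergeCharactersEvict kk (st.2 ++ [c]))

def mergeCharacters_alt (s : String) (k : Int) : String :=
  let kk := max k 0
  String.ofList (s.toList.foldl (mergeCharactersStepB kk) ([], [])).1

-- ===== PRECONDITION & SPEC =====
def Spec_mergeCharacters (s : String) (k : Int) (out : String) : Prop := out = mergeCharacters_alt s k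
instance (s : String) (k : Int) (out : String) : Decidable (Spec_mergeCharacters s k out) := by unfold Spec_mergeCharacters; infer_instance

-- ===== CLAIM (what is proved, stated in full; the proofs are below) =====
def Claim_equal_mergeCharacters : Prop := ∀ (s : String) (k : Int), Dom_mergeCharacters s k → Spec_mergeCharacters s k (mergeCharacters s k)

-- ===== LEMMAS AND PROOFS =====

-- invariant on A's side: idx maps exactly the characters of res to their LAST index in res
def GoodIdx (idx : PySem.Dict Char Int) (res : List Char) : Prop :=
  (∀ c p, PySem.Dict.get? idx c = some p →
     ∃ j : Nat, p = (j : Int) ∧ res[j]? = some c ∧ ∀ j' : Nat, j < j' → res[j']? ≠ some c) ∧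
  (∀ c : Char, PySem.Dict.get? idx c = none → c ∉ res)

-- B's window, expressed denotationally: the last (max k 0) kept characters
def Win (k : Int) (res : List Char) : List Char :=
  res.drop (res.length - (max k 0).toNat)

lemma mem_win_iff (res : List Char) (k : Int) (c : Char) :
    c ∈ Win k res ↔ ∃ j : Nat, res[j]? = some c ∧ (res.length : Int) - k ≤ (j : Int) := by
  unfold Win
  rw [List.mem_iff_getElem?]
  constructor
  · rintro ⟨i, hi⟩
    rw [List.getElem?_drop] at hi
    have hlt : res.length - (max k 0).toNat + i < res.length := (List.getElem?_eq_some_iff.1 hi).1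
    refine ⟨res.length - (max k 0).toNat + i, hi, ?_⟩
    have hk0 : (0:Int) ≤ max k 0 := le_max_right _ _
    have : ((max k 0).toNat : Int) = max k 0 := Int.toNat_of_nonneg hk0
    omega
  · rintro ⟨j, hj, hlej⟩
    have hjlt : j < res.length := (List.getElem?_eq_some_iff.1 hj).1
    have hk0 : (0:Int) ≤ max k 0 := le_max_right _ _
    have hcast : ((max k 0).toNat : Int) = max k 0 := Int.toNat_of_nonneg hk0
    have hmj : res.length - (max k 0).toNat ≤ j := by omega
    refine ⟨j - (res.length - (max k 0).toNat), ?_⟩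
    rw [List.getElem?_drop, Nat.add_sub_cancel' hmj]
    exact hj

-- A's skip condition equals membership in B's window, under the invariant
lemma cond_iff (idx : PySem.Dict Char Int) (res : List Char) (k : Int) (c : Char)
    (h : GoodIdx idx res) :
    (∃ p, PySem.Dict.get? idx c = some p ∧ (res.length : Int) - p ≤ k) ↔ c ∈ Win k res := by
  rw [mem_win_iff]
  constructor
  · rintro ⟨p, hp, hle⟩
    obtain ⟨j, hpj, hj, _⟩ := h.1 c p hp
    exact ⟨j, hj, by omega⟩
  · rintro ⟨j, hj, hle⟩
    have hcmem : c ∈ res := List.mem_of_getElem? hj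
    cases hg : PySem.Dict.get? idx c with
    | none => exact absurd hcmem (h.2 c hg)
    | some p =>
      obtain ⟨j0, hpj0, _, hlast⟩ := h.1 c p hg
      have hjle : j ≤ j0 := by
        by_contra hlt
        exact hlast j (by omega) hj
      exact ⟨p, rfl, by omega⟩

lemma good_append (idx : PySem.Dict Char Int) (res : List Char) (c : Char)
    (h : GoodIdx idx res) :
    GoodIdx (PySem.Dict.insert idx c (res.length : Int)) (res ++ [c]) := by
  constructor
  · intro c' p hp
    by_cases hcc : c' = c
    · subst hcc
      rw [PySem.Dict.get?_insert_self] at hp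
      refine ⟨res.length, by simpa using hp.symm, ?_, ?_⟩
      · simp
      · intro j' hj'
        have : (res ++ [c']).length ≤ j' := by simp; omega
        simp [List.getElem?_eq_none this]
    · rw [PySem.Dict.get?_insert_of_ne _ _ hcc] at hp
      obtain ⟨j, hpj, hj, hlast⟩ := h.1 c' p hp
      have hjlt : j < res.length := (List.getElem?_eq_some_iff.1 hj).1
      refine ⟨j, hpj, ?_, ?_⟩
      · rw [List.getElem?_append_left hjlt]; exact hj
      · intro j' hj'
        rcases lt_trichotomy j' res.length with hlt | heq | hgt
        · rw [List.getElem?_append_left hlt]; exact hlast j' hj'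
        · subst heq
          simp
          exact fun h => hcc h.symm
        · have : (res ++ [c]).length ≤ j' := by simp; omega
          simp [List.getElem?_eq_none this]
  · intro c' hg
    have hne : c' ≠ c := by
      intro hcc; subst hcc
      simp [PySem.Dict.get?_insert_self] at hg
    rw [PySem.Dict.get?_insert_of_ne _ _ hne] at hg
    simp [h.2 c' hg, hne]

-- the eviction loop is "drop from the front until length ≤ kk"
lemma evict_eq_drop (kk : Int) (hkk : 0 ≤ kk) :
    ∀ w : List Char, mergeCharactersEvict kk w = w.drop (w.length - kk.toNat) := by
  intro w
  induction w with
  | nil => simp [mergeCharactersEvict]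
  | cons c w ih =>
    unfold mergeCharactersEvict
    have hcast : (kk.toNat : Int) = kk := Int.toNat_of_nonneg hkk
    by_cases hgt : ((w.length : Int) + 1) > kk
    · rw [if_pos hgt, ih]
      have : (c :: w).length - kk.toNat = (w.length - kk.toNat) + 1 := by
        simp only [List.length_cons]; omega
      rw [this, List.drop_succ_cons]
    · rw [if_neg hgt]
      have : (c :: w).length - kk.toNat = 0 := by
        simp only [List.length_cons]; omega
      rw [this, List.drop_zero]

-- appending a kept character and evicting keeps the window denotation
lemma win_append (k : Int) (res : List Char) (c : Char) :
    mergeCharactersEvict (max k 0) (Win k res ++ [c]) = Win k (res ++ [c]) := by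
  have hkk : (0:Int) ≤ max k 0 := le_max_right _ _
  rw [evict_eq_drop _ hkk]
  unfold Win
  have hle : res.length - (max k 0).toNat ≤ res.length := Nat.sub_le _ _
  rw [← List.drop_append_of_le_length hle, List.drop_drop]
  congr 1
  simp only [List.length_append, List.length_drop, List.length_cons, List.length_nil]
  omega

-- main loop correspondence
lemma loop_eq (k : Int) : ∀ (cs : List Char) (idx : PySem.Dict Char Int) (res : List Char),
    GoodIdx idx res →
    (cs.foldl (mergeCharactersStepA k) (idx, (res.length : Int), res)).2.2 =
      (cs.foldl (mergeCharactersStepB (max k 0)) (res, Win k res)).1 := by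
  intro cs
  induction cs with
  | nil => intro idx res _; rfl
  | cons c cs ih =>
    intro idx res h
    simp only [List.foldl_cons]
    by_cases hc : c ∈ Win k res
    · obtain ⟨p, hp, hle⟩ := (cond_iff idx res k c h).2 hc
      have hA : mergeCharactersStepA k (idx, (res.length : Int), res) c
          = (idx, (res.length : Int), res) := by
        simp [mergeCharactersStepA, hp, hle]
      have hB : mergeCharactersStepB (max k 0) (res, Win k res) c = (res, Win k res) := by
        simp [mergeCharactersStepB, hc]
      rw [hA, hB]
      exact ih idx res h
    · have hA : mergeCharactersStepA k (idx, (res.length : Int), res) c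
          = (PySem.Dict.insert idx c (res.length : Int), ((res ++ [c]).length : Int), res ++ [c]) := by
        have hlen : ((res ++ [c]).length : Int) = (res.length : Int) + 1 := by simp
        cases hg : PySem.Dict.get? idx c with
        | none => simp [mergeCharactersStepA, hg]
        | some p =>
          have hnle : ¬ ((res.length : Int) - p ≤ k) := fun hle =>
            hc ((cond_iff idx res k c h).1 ⟨p, hg, hle⟩)
          simp [mergeCharactersStepA, hg, hnle]
      have hB : mergeCharactersStepB (max k 0) (res, Win k res) c
          = (res ++ [c], Win k (res ++ [c])) := by
        simp only [mergeCharactersStepB, if_neg hc]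
        rw [win_append]
      rw [hA, hB]
      exact ih _ _ (good_append idx res c h)

-- ===== VERDICT (by name: the statement is the Claim_ definition above) =====
theorem mergeCharacters_spec : Claim_equal_mergeCharacters := by
  intro s k _
  unfold Spec_mergeCharacters mergeCharacters mergeCharacters_alt
  have h := loop_eq k s.toList PySem.Dict.empty [] ?_
  · simpa [Win] using congrArg String.ofList h
  · constructor
    · intro c p hp; simp [PySem.Dict.get?, PySem.Dict.empty] at hp
    · intro c _; simp
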